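-- pv_equiv track=rewrite | github.com/georgeantonopoulos/oklch_nuke | src/nuke/oklch_grade_init.py | detect_linear_srgb_space
-- ===== SOURCE A (Python) =====
-- from typing import Iterable, List, Optional
--
-- LINEAR_SRGB_ALIASES = (
--     "Utility - Linear - sRGB",
--     "lin_srgb",
--     "Linear sRGB",
--     "srgb_linear",
-- )
--
-- def detect_linear_srgb_space(colorspaces: Iterable[str]) -> Optional[str]:
--     """Pick the best linear-sRGB colorspace alias from the active OCIO config."""
--     colorspaces = list(colorspaces)
--
--     for alias in LINEAR_SRGB_ALIASES:
--         if alias in colorspaces: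
--             return alias
--
--     lowered = {value.lower(): value for value in colorspaces}
--     for alias in LINEAR_SRGB_ALIASES:
--         hit = lowered.get(alias.lower())
--         if hit:
--             return hit
--
--     return None
-- ===== SOURCE B (Python) =====
-- from typing import Iterable, List, Optional
--
-- LINEAR_SRGB_ALIASES = (
--     "Utility - Linear - sRGB",
--     "lin_srgb",
--     "Linear sRGB",
--     "srgb_linear",
-- )
--
-- # Priority tables: exact alias matches rank 0..3, case-insensitive matches rank 4..7.
-- _EXACT_RANK = {a: i for i, a in enumerate(LINEAR_SRGB_ALIASES)}
-- _CI_RANK = {a.lower(): len(LINEAR_SRGB_ALIASES) + i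
--             for i, a in enumerate(LINEAR_SRGB_ALIASES)}
-- _NO_MATCH = 2 * len(LINEAR_SRGB_ALIASES)
--
--
-- def detect_linear_srgb_space(colorspaces):
--     """Pick the best linear-sRGB colorspace alias from the active OCIO config.
--
--     Single pass over colorspaces keeping the best-ranked match seen so far;
--     on equal rank a later occurrence wins (mirrors dict last-occurrence).
--     """
--     best_rank = _NO_MATCH
--     best_value = None
--     for value in colorspaces:
--         rank = _EXACT_RANK.get(value)
--         if rank is None:
--             rank = _CI_RANK.get(value.lower())
--             if rank is None:
--                 continue
--         if rank <= best_rank: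
--             best_rank = rank
--             best_value = value
--     return best_value
-- ===== Notes on version B (the rewrite author's own statement) =====
-- stated objective: alternative
-- what changed: A runs staged passes over the alias tuple (exact membership scans, then a full lowered dict probed per alias); B precomputes rank tables over the aliases and makes ONE pass over colorspaces with a running best-rank accumulator (ties going to later occurrences), returning the best value.
import Mathlib
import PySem

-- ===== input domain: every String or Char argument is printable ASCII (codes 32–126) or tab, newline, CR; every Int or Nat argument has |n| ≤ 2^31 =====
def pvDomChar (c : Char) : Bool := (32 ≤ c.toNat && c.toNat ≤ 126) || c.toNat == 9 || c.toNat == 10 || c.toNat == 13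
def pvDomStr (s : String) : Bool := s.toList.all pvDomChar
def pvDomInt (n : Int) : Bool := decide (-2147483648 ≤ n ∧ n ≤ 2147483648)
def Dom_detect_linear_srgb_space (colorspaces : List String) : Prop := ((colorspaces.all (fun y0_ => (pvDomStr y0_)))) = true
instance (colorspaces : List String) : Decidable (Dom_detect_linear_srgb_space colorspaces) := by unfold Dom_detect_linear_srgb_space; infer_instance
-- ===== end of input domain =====

-- B replaces A's staged alias-outer scans (exact pass, then a lowered dict probed per
-- alias) with ONE pass over colorspaces keeping a running best-ranked match.


-- ===== PORT A =====
def LINEAR_SRGB_ALIASES : List String :=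
  ["Utility - Linear - sRGB", "lin_srgb", "Linear sRGB", "srgb_linear"]

-- lowered = {value.lower(): value for value in colorspaces}
def pvLoweredOf (colorspaces : List String) : PySem.Dict String String :=
  colorspaces.foldl (fun d v => d.insert (PySem.Str.lower v) v) PySem.Dict.empty

-- second for-loop of A: first alias whose lowered key is present with a truthy hit
def pvPhase2 (lowered : PySem.Dict String String) : List String → Option String
  | [] => none
  | a :: rest =>
    match lowered.get? (PySem.Str.lower a) with
    | some hit => if hit ≠ "" then some hit else pvPhase2 lowered rest
    | none => pvPhase2 lowered rest

def detect_linear_srgb_space (colorspaces : List String) : Option String :=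
  match LINEAR_SRGB_ALIASES.find? (fun a => colorspaces.contains a) with
  | some a => some a
  | none => pvPhase2 (pvLoweredOf colorspaces) LINEAR_SRGB_ALIASES

-- ===== PORT B =====
-- _EXACT_RANK = {a: i for i, a in enumerate(LINEAR_SRGB_ALIASES)}
def pvExactRank : PySem.Dict String Int :=
  (PySem.List.enumerate LINEAR_SRGB_ALIASES).foldl
    (fun d p => d.insert p.2 p.1) PySem.Dict.empty

-- _CI_RANK = {a.lower(): len(LINEAR_SRGB_ALIASES) + i for i, a in enumerate(LINEAR_SRGB_ALIASES)}
def pvCiRank : PySem.Dict String Int :=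
  (PySem.List.enumerate LINEAR_SRGB_ALIASES).foldl
    (fun d p => d.insert (PySem.Str.lower p.2) ((LINEAR_SRGB_ALIASES.length : Int) + p.1))
    PySem.Dict.empty

-- the rank computed for one value inside B's loop (exact beats case-insensitive)
def pvRankOf (v : String) : Option Int :=
  match pvExactRank.get? v with
  | some r => some r
  | none => pvCiRank.get? (PySem.Str.lower v)

-- one iteration of B's loop over (best_rank, best_value)
def pvBStep (st : Int × Option String) (v : String) : Int × Option String :=
  match pvRankOf v with
  | none => st
  | some r => if r ≤ st.1 then (r, some v) else st

def detect_linear_srgb_space_alt (colorspaces : List String) : Option String :=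
  (colorspaces.foldl pvBStep ((2 * LINEAR_SRGB_ALIASES.length : Int), none)).2

-- ===== PRECONDITION & SPEC =====
def Spec_detect_linear_srgb_space (colorspaces : List String) (out : Option String) : Prop := out = detect_linear_srgb_space_alt colorspaces
instance (colorspaces : List String) (out : Option String) : Decidable (Spec_detect_linear_srgb_space colorspaces out) := by unfold Spec_detect_linear_srgb_space; infer_instance

-- ===== CLAIM (what is proved, stated in full; the proofs are below) =====
def Claim_equal_detect_linear_srgb_space : Prop := ∀ (colorspaces : List String), Dom_detect_linear_srgb_space colorspaces → Spec_detect_linear_srgb_space colorspaces (detect_linear_srgb_space colorspaces)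

-- ===== LEMMAS AND PROOFS =====

-- the minimal rank present in cs (8 if none), as B's fold computes it
def pvMinR (cs : List String) : Int := (cs.filterMap pvRankOf).foldl min 8

-- the exact-rank table, spelled out
theorem pvExactRank_get (v : String) :
    pvExactRank.get? v =
      (if v = "Utility - Linear - sRGB" then some 0 else
       if v = "lin_srgb" then some 1 else
       if v = "Linear sRGB" then some 2 else
       if v = "srgb_linear" then some 3 else none) := by
  have hitems : pvExactRank.items =
      [("Utility - Linear - sRGB", (0:Int)), ("lin_srgb", 1), ("Linear sRGB", 2),
       ("srgb_linear", 3)] := by decide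
  simp only [PySem.Dict.get?, hitems, List.find?]
  by_cases h0 : v = "Utility - Linear - sRGB" <;>
  by_cases h1 : v = "lin_srgb" <;>
  by_cases h2 : v = "Linear sRGB" <;>
  by_cases h3 : v = "srgb_linear" <;>
  first
    | (simp_all [eq_comm]; done)
    | (rw [beq_eq_false_iff_ne.mpr (Ne.symm h0), beq_eq_false_iff_ne.mpr (Ne.symm h1),
           beq_eq_false_iff_ne.mpr (Ne.symm h2), beq_eq_false_iff_ne.mpr (Ne.symm h3)]
       simp [h0, h1, h2, h3])

-- the ci-rank table, spelled out
theorem pvCiRank_get (k : String) :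
    pvCiRank.get? k =
      (if k = "utility - linear - srgb" then some 4 else
       if k = "lin_srgb" then some 5 else
       if k = "linear srgb" then some 6 else
       if k = "srgb_linear" then some 7 else none) := by
  have hitems : pvCiRank.items =
      [("utility - linear - srgb", (4:Int)), ("lin_srgb", 5), ("linear srgb", 6),
       ("srgb_linear", 7)] := by decide
  simp only [PySem.Dict.get?, hitems, List.find?]
  by_cases h0 : k = "utility - linear - srgb" <;>
  by_cases h1 : k = "lin_srgb" <;>
  by_cases h2 : k = "linear srgb" <;>
  by_cases h3 : k = "srgb_linear" <;>
  first
    | (simp_all [eq_comm]; done)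
    | (rw [beq_eq_false_iff_ne.mpr (Ne.symm h0), beq_eq_false_iff_ne.mpr (Ne.symm h1),
           beq_eq_false_iff_ne.mpr (Ne.symm h2), beq_eq_false_iff_ne.mpr (Ne.symm h3)]
       simp [h0, h1, h2, h3])

-- B's per-value rank, spelled out as one if-chain
theorem pvRankOf_eq (v : String) :
    pvRankOf v =
      (if v = "Utility - Linear - sRGB" then some 0 else
       if v = "lin_srgb" then some 1 else
       if v = "Linear sRGB" then some 2 else
       if v = "srgb_linear" then some 3 else
       if PySem.Str.lower v = "utility - linear - srgb" then some 4 else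
       if PySem.Str.lower v = "lin_srgb" then some 5 else
       if PySem.Str.lower v = "linear srgb" then some 6 else
       if PySem.Str.lower v = "srgb_linear" then some 7 else none) := by
  unfold pvRankOf
  rw [pvExactRank_get, pvCiRank_get]
  split_ifs <;> rfl

-- ranks are bounded
theorem pvRank_bounds (v : String) (r : Int) (h : pvRankOf v = some r) : 0 ≤ r ∧ r < 8 := by
  rw [pvRankOf_eq] at h
  split_ifs at h <;> simp_all <;> omega

-- foldl min is a lower bound of every member …
theorem pvFoldlMin_le_init (l : List Int) (a : Int) : l.foldl min a ≤ a := by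
  induction l generalizing a with
  | nil => simp
  | cons y ys ih => exact le_trans (ih (min a y)) (min_le_left _ _)

theorem pvFoldlMin_le (l : List Int) (a x : Int) (h : x ∈ l) : l.foldl min a ≤ x := by
  induction l generalizing a with
  | nil => cases h
  | cons y ys ih =>
    rcases List.mem_cons.1 h with rfl | hm
    · exact le_trans (pvFoldlMin_le_init ys (min a x)) (min_le_right _ _)
    · exact ih _ hm

-- … and at least any common lower bound
theorem pvLe_foldlMin (l : List Int) (a c : Int) (ha : c ≤ a) (h : ∀ x ∈ l, c ≤ x) :
    c ≤ l.foldl min a := by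
  induction l generalizing a with
  | nil => simpa
  | cons y ys ih =>
    simp only [List.foldl_cons]
    exact ih _ (le_min ha (h y List.mem_cons_self)) (fun x hx => h x (List.mem_cons_of_mem _ hx))

-- pvMinR is the minimal rank present
theorem pvMinR_eq (cs : List String) (r : Int)
    (hmem : ∃ v ∈ cs, pvRankOf v = some r)
    (hlb : ∀ v ∈ cs, ∀ r', pvRankOf v = some r' → r ≤ r')
    (hr8 : r ≤ 8) : pvMinR cs = r := by
  obtain ⟨v, hv, hrv⟩ := hmem
  refine le_antisymm ?_ ?_
  · exact pvFoldlMin_le _ _ _ (List.mem_filterMap.2 ⟨v, hv, hrv⟩)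
  · refine pvLe_foldlMin _ _ _ hr8 ?_
    intro x hx
    obtain ⟨w, hw, hrw⟩ := List.mem_filterMap.1 hx
    exact hlb w hw x hrw

-- a filter whose predicate pins the value has that value last (if present)
theorem pvFilter_getLast_self (cs : List String) (a : String) (p : String → Bool)
    (ha : a ∈ cs) (hp : ∀ v, p v = true ↔ v = a) :
    (cs.filter p).getLast? = some a := by
  induction cs using List.reverseRecOn with
  | nil => cases ha
  | append_singleton cs x ih =>
    rw [List.filter_append]
    by_cases hx : x = a
    · subst hx
      simp [List.filter, (hp x).2 rfl]
    · have hpx : p x = false := by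
        cases hpe : p x
        · rfl
        · exact absurd ((hp x).1 hpe) hx
      have ha' : a ∈ cs := by
        rcases List.mem_append.1 ha with h | h
        · exact h
        · simp only [List.mem_singleton] at h; exact absurd h.symm hx
      simp [List.filter, hpx, ih ha']

-- A's lowered dict looks up the LAST occurrence whose lowercase equals the key
theorem pvLowered_get (cs : List String) (k : String) :
    (pvLoweredOf cs).get? k = (cs.filter (fun v => PySem.Str.lower v == k)).getLast? := by
  induction cs using List.reverseRecOn with
  | nil => rfl
  | append_singleton cs x ih =>
    have hfold : pvLoweredOf (cs ++ [x]) = (pvLoweredOf cs).insert (PySem.Str.lower x) x := by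
      simp [pvLoweredOf, List.foldl_append]
    rw [hfold, List.filter_append]
    by_cases hx : PySem.Str.lower x = k
    · subst hx
      rw [PySem.Dict.get?_insert_self]
      simp [List.filter]
    · rw [PySem.Dict.get?_insert_of_ne _ _ (Ne.symm hx)]
      simp [List.filter, beq_eq_false_iff_ne.mpr hx, ih]

-- B's fold computes the minimal rank together with the LAST value attaining it
theorem pvFold_char (cs : List String) :
    cs.foldl pvBStep (8, none) =
      (pvMinR cs, (cs.filter (fun v => pvRankOf v == some (pvMinR cs))).getLast?) := by
  induction cs using List.reverseRecOn with
  | nil => rfl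
  | append_singleton cs x ih =>
    have hmin : pvMinR (cs ++ [x]) =
        (match pvRankOf x with | none => pvMinR cs | some r => min (pvMinR cs) r) := by
      unfold pvMinR
      rw [List.filterMap_append, List.foldl_append]
      cases hr : pvRankOf x <;> simp [hr, List.filterMap]
    rw [List.foldl_append, List.foldl_cons, List.foldl_nil, ih]
    unfold pvBStep
    cases hrx : pvRankOf x with
    | none =>
      simp only [hmin, List.filter_append, List.filter, hrx]
      simp
    | some r =>
      simp only [hmin, hrx]
      by_cases hle : r ≤ pvMinR cs
      · rw [if_pos hle]
        have hm : min (pvMinR cs) r = r := min_eq_right hle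
        rw [hm]
        have : (cs ++ [x]).filter (fun v => pvRankOf v == some r) =
            cs.filter (fun v => pvRankOf v == some r) ++ [x] := by
          simp [List.filter_append, List.filter, hrx]
        rw [this, List.getLast?_concat]
      · rw [if_neg hle]
        have hm : min (pvMinR cs) r = pvMinR cs := min_eq_left (by omega)
        rw [hm]
        have hne : (pvRankOf x == some (pvMinR cs)) = false := by
          simp [hrx]
          omega
        simp [List.filter_append, List.filter, hne]

-- exact ranks (< 4) pin the value to the corresponding alias
theorem pvRank_lt4 (v : String) (r : Int) (h : pvRankOf v = some r) (h4 : r < 4) :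
    (r = 0 ∧ v = "Utility - Linear - sRGB") ∨ (r = 1 ∧ v = "lin_srgb") ∨
    (r = 2 ∧ v = "Linear sRGB") ∨ (r = 3 ∧ v = "srgb_linear") := by
  rw [pvRankOf_eq] at h
  split_ifs at h <;> simp_all <;> omega

-- ci ranks (≥ 4) pin the lowercase of the value
theorem pvRank_ci (v : String) (r : Int) (h : pvRankOf v = some r) (h4 : 4 ≤ r) :
    (r = 4 ∧ PySem.Str.lower v = "utility - linear - srgb") ∨
    (r = 5 ∧ PySem.Str.lower v = "lin_srgb") ∨
    (r = 6 ∧ PySem.Str.lower v = "linear srgb") ∨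
    (r = 7 ∧ PySem.Str.lower v = "srgb_linear") := by
  rw [pvRankOf_eq] at h
  split_ifs at h <;> simp_all <;> omega

-- a value absent in every form below rank i bounds all ranks in cs from below by i
theorem pvLB_main (cs : List String) (i : Int)
    (h0 : 0 < i → "Utility - Linear - sRGB" ∉ cs)
    (h1 : 1 < i → "lin_srgb" ∉ cs)
    (h2 : 2 < i → "Linear sRGB" ∉ cs)
    (h3 : 3 < i → "srgb_linear" ∉ cs)
    (h4 : 4 < i → ∀ v ∈ cs, PySem.Str.lower v ≠ "utility - linear - srgb")
    (h5 : 5 < i → ∀ v ∈ cs, PySem.Str.lower v ≠ "lin_srgb")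
    (h6 : 6 < i → ∀ v ∈ cs, PySem.Str.lower v ≠ "linear srgb")
    (h7 : 7 < i → ∀ v ∈ cs, PySem.Str.lower v ≠ "srgb_linear") :
    ∀ v ∈ cs, ∀ r', pvRankOf v = some r' → i ≤ r' := by
  intro v hv r' hr'
  have hb := pvRank_bounds v r' hr'
  by_contra hlt
  replace hlt : r' < i := by omega
  by_cases hc : r' < 4
  · rcases pvRank_lt4 v r' hr' hc with ⟨hr, he⟩ | ⟨hr, he⟩ | ⟨hr, he⟩ | ⟨hr, he⟩
    · exact h0 (by omega) (he ▸ hv)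
    · exact h1 (by omega) (he ▸ hv)
    · exact h2 (by omega) (he ▸ hv)
    · exact h3 (by omega) (he ▸ hv)
  · rcases pvRank_ci v r' hr' (by omega) with ⟨hr, he⟩ | ⟨hr, he⟩ | ⟨hr, he⟩ | ⟨hr, he⟩
    · exact h4 (by omega) v hv he
    · exact h5 (by omega) v hv he
    · exact h6 (by omega) v hv he
    · exact h7 (by omega) v hv he

-- an occurrence whose lowercase is la keeps the filtered list nonempty
theorem pvFilterNonempty (cs : List String) (v la : String) (hv : v ∈ cs)
    (hl : PySem.Str.lower v = la) :
    (cs.filter (fun w => PySem.Str.lower w == la)).getLast? ≠ none := by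
  intro h
  have hnil := List.getLast?_eq_none_iff.mp h
  have hm : v ∈ cs.filter (fun w => PySem.Str.lower w == la) :=
    List.mem_filter.2 ⟨hv, by simp [hl]⟩
  simp [hnil] at hm

theorem pvNoLower (cs : List String) (la : String)
    (hg : (cs.filter (fun w => PySem.Str.lower w == la)).getLast? = none) :
    ∀ v ∈ cs, PySem.Str.lower v ≠ la :=
  fun v hv hl => pvFilterNonempty cs v la hv hl hg

-- exact-match leaf: the best-ranked last value is the alias itself
theorem pvExactCase (cs : List String) (a : String) (i : Int)
    (hrk : pvRankOf a = some i)
    (hiff : ∀ v, pvRankOf v = some i → v = a)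
    (hmem : a ∈ cs)
    (hlb : ∀ v ∈ cs, ∀ r', pvRankOf v = some r' → i ≤ r')
    (hi8 : i ≤ 8) :
    (cs.filter (fun v => pvRankOf v == some (pvMinR cs))).getLast? = some a := by
  rw [pvMinR_eq cs i ⟨a, hmem, hrk⟩ hlb hi8]
  refine pvFilter_getLast_self cs a _ hmem (fun v => ?_)
  constructor
  · intro h
    exact hiff v (by simpa using h)
  · intro h
    subst h
    simp [hrk]

-- case-insensitive leaf: the best-ranked last value is the lowered dict's hit
theorem pvCiCase (cs : List String) (la h : String) (i : Int)
    (hiff : ∀ v ∈ cs, (pvRankOf v = some i ↔ PySem.Str.lower v = la))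
    (hlb : ∀ v ∈ cs, ∀ r', pvRankOf v = some r' → i ≤ r')
    (hget : (cs.filter (fun v => PySem.Str.lower v == la)).getLast? = some h)
    (hi8 : i ≤ 8) :
    (cs.filter (fun v => pvRankOf v == some (pvMinR cs))).getLast? = some h := by
  have hmem := List.mem_of_getLast? hget
  have hh := List.mem_filter.1 hmem
  have hlh : PySem.Str.lower h = la := by simpa using hh.2
  have hrk : pvRankOf h = some i := (hiff h hh.1).2 hlh
  rw [pvMinR_eq cs i ⟨h, hh.1, hrk⟩ hlb hi8]
  rw [List.filter_congr (fun v hv => ?_)]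
  · exact hget
  · by_cases hb : PySem.Str.lower v = la
    · simp [hb, (hiff v hv).2 hb]
    · simp only [beq_eq_false_iff_ne.mpr hb]
      simp only [beq_eq_false_iff_ne, ne_eq]
      intro hc
      exact hb ((hiff v hv).1 hc)

-- a value matching no alias in any form has no rank
theorem pvRank_none (v : String)
    (hn0 : v ≠ "Utility - Linear - sRGB") (hn1 : v ≠ "lin_srgb")
    (hn2 : v ≠ "Linear sRGB") (hn3 : v ≠ "srgb_linear")
    (hl0 : PySem.Str.lower v ≠ "utility - linear - srgb")
    (hl1 : PySem.Str.lower v ≠ "lin_srgb")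
    (hl2 : PySem.Str.lower v ≠ "linear srgb")
    (hl3 : PySem.Str.lower v ≠ "srgb_linear") : pvRankOf v = none := by
  rw [pvRankOf_eq, if_neg hn0, if_neg hn1, if_neg hn2, if_neg hn3,
      if_neg hl0, if_neg hl1, if_neg hl2, if_neg hl3]

-- ===== VERDICT (by name: the statement is the Claim_ definition above) =====
theorem detect_linear_srgb_space_spec : Claim_equal_detect_linear_srgb_space := by
  intro cs _hd
  unfold Spec_detect_linear_srgb_space
  have halt : detect_linear_srgb_space_alt cs =
      (cs.filter (fun v => pvRankOf v == some (pvMinR cs))).getLast? := by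
    unfold detect_linear_srgb_space_alt
    rw [show ((2 * (LINEAR_SRGB_ALIASES.length : Int) : Int), (none : Option String)) =
        ((8 : Int), (none : Option String)) from by decide]
    rw [pvFold_char]
  rw [halt]
  unfold detect_linear_srgb_space
  have l0 : PySem.Str.lower "Utility - Linear - sRGB" = "utility - linear - srgb" := by decide
  have l1 : PySem.Str.lower "lin_srgb" = "lin_srgb" := by decide
  have l2 : PySem.Str.lower "Linear sRGB" = "linear srgb" := by decide
  have l3 : PySem.Str.lower "srgb_linear" = "srgb_linear" := by decide
  by_cases e0 : cs.contains "Utility - Linear - sRGB" = true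
  · simp only [LINEAR_SRGB_ALIASES, List.find?, e0]
    refine (pvExactCase cs _ 0 (by decide) ?_ (List.mem_of_elem_eq_true e0) ?_ (by norm_num)).symm
    · intro v h
      rcases pvRank_lt4 v 0 h (by norm_num) with ⟨_, he⟩ | ⟨hr, _⟩ | ⟨hr, _⟩ | ⟨hr, _⟩ <;>
        first | exact he | exact absurd hr (by norm_num)
    · intro v hv r' hr'
      exact (pvRank_bounds v r' hr').1
  · have m0 : "Utility - Linear - sRGB" ∉ cs := fun hm => e0 (List.elem_eq_true_of_mem hm)
    rw [Bool.not_eq_true] at e0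
    by_cases e1 : cs.contains "lin_srgb" = true
    · simp only [LINEAR_SRGB_ALIASES, List.find?, e0, e1]
      refine (pvExactCase cs _ 1 (by decide) ?_ (List.mem_of_elem_eq_true e1) ?_ (by norm_num)).symm
      · intro v h
        rcases pvRank_lt4 v 1 h (by norm_num) with ⟨hr, _⟩ | ⟨_, he⟩ | ⟨hr, _⟩ | ⟨hr, _⟩ <;>
          first | exact he | exact absurd hr (by norm_num)
      · exact pvLB_main cs 1 (fun _ => m0) (fun h => absurd h (by norm_num))
          (fun h => absurd h (by norm_num)) (fun h => absurd h (by norm_num))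
          (fun h => absurd h (by norm_num)) (fun h => absurd h (by norm_num))
          (fun h => absurd h (by norm_num)) (fun h => absurd h (by norm_num))
    · have m1 : "lin_srgb" ∉ cs := fun hm => e1 (List.elem_eq_true_of_mem hm)
      rw [Bool.not_eq_true] at e1
      by_cases e2 : cs.contains "Linear sRGB" = true
      · simp only [LINEAR_SRGB_ALIASES, List.find?, e0, e1, e2]
        refine (pvExactCase cs _ 2 (by decide) ?_ (List.mem_of_elem_eq_true e2) ?_ (by norm_num)).symm
        · intro v h
          rcases pvRank_lt4 v 2 h (by norm_num) with ⟨hr, _⟩ | ⟨hr, _⟩ | ⟨_, he⟩ | ⟨hr, _⟩ <;>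
            first | exact he | exact absurd hr (by norm_num)
        · exact pvLB_main cs 2 (fun _ => m0) (fun _ => m1)
            (fun h => absurd h (by norm_num)) (fun h => absurd h (by norm_num))
            (fun h => absurd h (by norm_num)) (fun h => absurd h (by norm_num))
            (fun h => absurd h (by norm_num)) (fun h => absurd h (by norm_num))
      · have m2 : "Linear sRGB" ∉ cs := fun hm => e2 (List.elem_eq_true_of_mem hm)
        rw [Bool.not_eq_true] at e2
        by_cases e3 : cs.contains "srgb_linear" = true
        · simp only [LINEAR_SRGB_ALIASES, List.find?, e0, e1, e2, e3]
          refine (pvExactCase cs _ 3 (by decide) ?_ (List.mem_of_elem_eq_true e3) ?_ (by norm_num)).symm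
          · intro v h
            rcases pvRank_lt4 v 3 h (by norm_num) with ⟨hr, _⟩ | ⟨hr, _⟩ | ⟨hr, _⟩ | ⟨_, he⟩ <;>
              first | exact he | exact absurd hr (by norm_num)
          · exact pvLB_main cs 3 (fun _ => m0) (fun _ => m1) (fun _ => m2)
              (fun h => absurd h (by norm_num))
              (fun h => absurd h (by norm_num)) (fun h => absurd h (by norm_num))
              (fun h => absurd h (by norm_num)) (fun h => absurd h (by norm_num))
        · have m3 : "srgb_linear" ∉ cs := fun hm => e3 (List.elem_eq_true_of_mem hm)
          rw [Bool.not_eq_true] at e3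
          -- no exact alias present: A falls to its dict phase
          have hne : ∀ v ∈ cs, v ≠ "Utility - Linear - sRGB" ∧ v ≠ "lin_srgb" ∧
              v ≠ "Linear sRGB" ∧ v ≠ "srgb_linear" := by
            intro v hv
            exact ⟨fun h => m0 (h ▸ hv), fun h => m1 (h ▸ hv),
                   fun h => m2 (h ▸ hv), fun h => m3 (h ▸ hv)⟩
          have hiffgen : ∀ (la : String) (i : Int),
              (∀ v, pvRankOf v = some i → PySem.Str.lower v = la) →
              (∀ (v : String), v ≠ "Utility - Linear - sRGB" → v ≠ "lin_srgb" →
                v ≠ "Linear sRGB" → v ≠ "srgb_linear" → PySem.Str.lower v = la →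
                pvRankOf v = some i) →
              ∀ v ∈ cs, (pvRankOf v = some i ↔ PySem.Str.lower v = la) := by
            intro la i hf hb v hv
            obtain ⟨n0, n1, n2, n3⟩ := hne v hv
            exact ⟨hf v, hb v n0 n1 n2 n3⟩
          simp only [LINEAR_SRGB_ALIASES, List.find?, e0, e1, e2, e3, pvPhase2,
            l0, l1, l2, l3, pvLowered_get]
          cases hg0 : (cs.filter (fun v => PySem.Str.lower v == "utility - linear - srgb")).getLast? with
          | some h =>
            have hh := List.mem_filter.1 (List.mem_of_getLast? hg0)
            have hlh : PySem.Str.lower h = "utility - linear - srgb" := by simpa using hh.2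
            have hne'' : h ≠ "" := by
              intro h0
              rw [h0] at hlh
              exact absurd hlh (by decide)
            simp only []
            rw [if_pos hne'']
            refine (pvCiCase cs _ h 4 ?_ ?_ hg0 (by norm_num)).symm
            · refine hiffgen _ 4 ?_ ?_
              · intro v hr
                rcases pvRank_ci v 4 hr (by norm_num) with ⟨_, he⟩ | ⟨hr', _⟩ | ⟨hr', _⟩ | ⟨hr', _⟩ <;>
                  first | exact he | exact absurd hr' (by norm_num)
              · intro v n0 n1 n2 n3 hl
                rw [pvRankOf_eq, if_neg n0, if_neg n1, if_neg n2, if_neg n3, if_pos hl]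
            · exact pvLB_main cs 4 (fun _ => m0) (fun _ => m1) (fun _ => m2) (fun _ => m3)
                (fun h => absurd h (by norm_num)) (fun h => absurd h (by norm_num))
                (fun h => absurd h (by norm_num)) (fun h => absurd h (by norm_num))
          | none =>
            have nl0 := pvNoLower cs _ hg0
            cases hg1 : (cs.filter (fun v => PySem.Str.lower v == "lin_srgb")).getLast? with
            | some h =>
              have hh := List.mem_filter.1 (List.mem_of_getLast? hg1)
              have hlh : PySem.Str.lower h = "lin_srgb" := by simpa using hh.2
              have hne'' : h ≠ "" := by
                intro h0
                rw [h0] at hlh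
                exact absurd hlh (by decide)
              simp only []
              rw [if_pos hne'']
              refine (pvCiCase cs _ h 5 ?_ ?_ hg1 (by norm_num)).symm
              · refine hiffgen _ 5 ?_ ?_
                · intro v hr
                  rcases pvRank_ci v 5 hr (by norm_num) with ⟨hr', _⟩ | ⟨_, he⟩ | ⟨hr', _⟩ | ⟨hr', _⟩ <;>
                    first | exact he | exact absurd hr' (by norm_num)
                · intro v n0 n1 n2 n3 hl
                  have hl0' : PySem.Str.lower v ≠ "utility - linear - srgb" := by
                    rw [hl]; decide
                  rw [pvRankOf_eq, if_neg n0, if_neg n1, if_neg n2, if_neg n3,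
                      if_neg hl0', if_pos hl]
              · exact pvLB_main cs 5 (fun _ => m0) (fun _ => m1) (fun _ => m2) (fun _ => m3)
                  (fun _ => nl0) (fun h => absurd h (by norm_num))
                  (fun h => absurd h (by norm_num)) (fun h => absurd h (by norm_num))
            | none =>
              have nl1 := pvNoLower cs _ hg1
              cases hg2 : (cs.filter (fun v => PySem.Str.lower v == "linear srgb")).getLast? with
              | some h =>
                have hh := List.mem_filter.1 (List.mem_of_getLast? hg2)
                have hlh : PySem.Str.lower h = "linear srgb" := by simpa using hh.2
                have hne'' : h ≠ "" := by
                  intro h0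
                  rw [h0] at hlh
                  exact absurd hlh (by decide)
                simp only []
                rw [if_pos hne'']
                refine (pvCiCase cs _ h 6 ?_ ?_ hg2 (by norm_num)).symm
                · refine hiffgen _ 6 ?_ ?_
                  · intro v hr
                    rcases pvRank_ci v 6 hr (by norm_num) with ⟨hr', _⟩ | ⟨hr', _⟩ | ⟨_, he⟩ | ⟨hr', _⟩ <;>
                      first | exact he | exact absurd hr' (by norm_num)
                  · intro v n0 n1 n2 n3 hl
                    have hl0' : PySem.Str.lower v ≠ "utility - linear - srgb" := by
                      rw [hl]; decide
                    have hl1' : PySem.Str.lower v ≠ "lin_srgb" := by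
                      rw [hl]; decide
                    rw [pvRankOf_eq, if_neg n0, if_neg n1, if_neg n2, if_neg n3,
                        if_neg hl0', if_neg hl1', if_pos hl]
                · exact pvLB_main cs 6 (fun _ => m0) (fun _ => m1) (fun _ => m2) (fun _ => m3)
                    (fun _ => nl0) (fun _ => nl1)
                    (fun h => absurd h (by norm_num)) (fun h => absurd h (by norm_num))
              | none =>
                have nl2 := pvNoLower cs _ hg2
                cases hg3 : (cs.filter (fun v => PySem.Str.lower v == "srgb_linear")).getLast? with
                | some h =>
                  have hh := List.mem_filter.1 (List.mem_of_getLast? hg3)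
                  have hlh : PySem.Str.lower h = "srgb_linear" := by simpa using hh.2
                  have hne'' : h ≠ "" := by
                    intro h0
                    rw [h0] at hlh
                    exact absurd hlh (by decide)
                  simp only []
                  rw [if_pos hne'']
                  refine (pvCiCase cs _ h 7 ?_ ?_ hg3 (by norm_num)).symm
                  · refine hiffgen _ 7 ?_ ?_
                    · intro v hr
                      rcases pvRank_ci v 7 hr (by norm_num) with ⟨hr', _⟩ | ⟨hr', _⟩ | ⟨hr', _⟩ | ⟨_, he⟩ <;>
                        first | exact he | exact absurd hr' (by norm_num)
                    · intro v n0 n1 n2 n3 hl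
                      have hl0' : PySem.Str.lower v ≠ "utility - linear - srgb" := by
                        rw [hl]; decide
                      have hl1' : PySem.Str.lower v ≠ "lin_srgb" := by
                        rw [hl]; decide
                      have hl2' : PySem.Str.lower v ≠ "linear srgb" := by
                        rw [hl]; decide
                      rw [pvRankOf_eq, if_neg n0, if_neg n1, if_neg n2, if_neg n3,
                          if_neg hl0', if_neg hl1', if_neg hl2', if_pos hl]
                  · exact pvLB_main cs 7 (fun _ => m0) (fun _ => m1) (fun _ => m2) (fun _ => m3)
                      (fun _ => nl0) (fun _ => nl1) (fun _ => nl2)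
                      (fun h => absurd h (by norm_num))
                | none =>
                  have nl3 := pvNoLower cs _ hg3
                  have hfil : cs.filter (fun v => pvRankOf v == some (pvMinR cs)) = [] := by
                    refine List.filter_eq_nil_iff.mpr ?_
                    intro v hv hbeq
                    obtain ⟨n0, n1, n2, n3⟩ := hne v hv
                    have := pvRank_none v n0 n1 n2 n3 (nl0 v hv) (nl1 v hv) (nl2 v hv) (nl3 v hv)
                    simp [this] at hbeq
                  simp only []
                  rw [hfil]
                  rfl
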